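-- pv_equiv track=rewrite | github.com/CodeEffect/IsItTerminal | IsItTerminal.py | escape_local_path
-- ===== SOURCE A (Python) =====
-- def escape_local_path(path):
--     replacements = [
--         ["<", "{"],
--         [">", "}"],
--         [":", ";"],
--         ["\"", "'"],
--         ["/", "_"],
--         ["\\", "_"],
--         ["|", "_"],
--         ["?", "~"],
--         ["*", "+"]
--     ]
--     for r in replacements:
--         path = path.replace(r[0], r[1])
--     return path
-- ===== SOURCE B (Python) =====
-- _TABLE = str.maketrans({'<': '{', '>': '}', ':': ';', '"': "'",
--                         '/': '_', '\\': '_', '|': '_', '?': '~', '*': '+'})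
--
--
-- def escape_local_path(path):
--     return path.translate(_TABLE)
-- ===== Notes on version B (the rewrite author's own statement) =====
-- stated objective: idiomatic
-- what changed: B replaces nine sequential full-string replace() passes with a single table-driven per-character pass via str.translate over a precomputed translation table.
import Mathlib
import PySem

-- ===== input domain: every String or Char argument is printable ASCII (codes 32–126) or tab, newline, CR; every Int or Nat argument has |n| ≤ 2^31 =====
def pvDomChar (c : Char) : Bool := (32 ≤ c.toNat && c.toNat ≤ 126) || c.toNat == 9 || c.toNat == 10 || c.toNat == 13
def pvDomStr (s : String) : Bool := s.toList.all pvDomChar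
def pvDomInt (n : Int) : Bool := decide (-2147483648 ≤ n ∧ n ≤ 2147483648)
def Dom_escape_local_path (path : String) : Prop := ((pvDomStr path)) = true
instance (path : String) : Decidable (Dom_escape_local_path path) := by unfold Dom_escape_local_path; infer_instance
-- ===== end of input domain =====

-- B replaces A's nine sequential full-string replace passes with one table-driven per-character pass (idiomatic str.translate).

-- ===== PORT A =====
def escape_local_path (path : String) : String :=
  let replacements : List (String × String) :=
    [("<", "{"), (">", "}"), (":", ";"), ("\"", "'"), ("/", "_"),
     ("\\", "_"), ("|", "_"), ("?", "~"), ("*", "+")]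
  replacements.foldl (fun p r => PySem.Str.replace p r.1 r.2) path

-- ===== PORT B =====
-- the translation table built once by str.maketrans (dict char -> char, lookup defaults to the char itself)
def pvTable : List (Char × Char) :=
  [('<', '{'), ('>', '}'), (':', ';'), ('"', '\''), ('/', '_'),
   ('\\', '_'), ('|', '_'), ('?', '~'), ('*', '+')]

def escape_local_path_alt (path : String) : String :=
  String.ofList (path.toList.map (fun c => (pvTable.lookup c).getD c))

-- ===== PRECONDITION & SPEC =====
def Spec_escape_local_path (path : String) (out : String) : Prop := out = escape_local_path_alt path
instance (path : String) (out : String) : Decidable (Spec_escape_local_path path out) := by unfold Spec_escape_local_path; infer_instance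

-- ===== CLAIM (what is proved, stated in full; the proofs are below) =====
def Claim_equal_escape_local_path : Prop := ∀ (path : String), Dom_escape_local_path path → Spec_escape_local_path path (escape_local_path path)

-- ===== LEMMAS AND PROOFS =====

-- single-character replace is a per-character map
theorem replace_go_single (a b : Char) :
    ∀ (l acc : List Char) (fuel : Nat), l.length ≤ fuel →
      PySem.Chars.replace.go [a] [b] fuel l acc
        = acc.reverse ++ l.map (fun c => if a == c then b else c) := by
  intro l
  induction l with
  | nil =>
    intro acc fuel _
    cases fuel <;> simp [PySem.Chars.replace.go]
  | cons c t ih =>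
    intro acc fuel hlen
    cases fuel with
    | zero => simp at hlen
    | succ fuel =>
      have ht : t.length ≤ fuel := by simpa using hlen
      by_cases h : a = c
      · subst h
        simp [PySem.Chars.replace.go, List.isPrefixOf, ih _ _ ht]
      · have hb : (a == c) = false := by simp [h]
        simp [PySem.Chars.replace.go, List.isPrefixOf, hb, h, ih _ _ ht]

theorem replace_single (s : List Char) (a b : Char) :
    PySem.Chars.replace s [a] [b] = s.map (fun c => if a == c then b else c) := by
  simp [PySem.Chars.replace, replace_go_single a b s [] s.length le_rfl]

theorem point (c : Char) :
    (fun c => if ('*' == c) = true then '+' else c)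
      ((fun c => if ('?' == c) = true then '~' else c)
      ((fun c => if ('|' == c) = true then '_' else c)
      ((fun c => if ('\\' == c) = true then '_' else c)
      ((fun c => if ('/' == c) = true then '_' else c)
      ((fun c => if ('"' == c) = true then '\'' else c)
      ((fun c => if (':' == c) = true then ';' else c)
      ((fun c => if ('>' == c) = true then '}' else c)
      ((fun c => if ('<' == c) = true then '{' else c) c))))))))
      = (pvTable.lookup c).getD c := by
  by_cases h1 : c = '<'; · subst h1; decide
  by_cases h2 : c = '>'; · subst h2; decide
  by_cases h3 : c = ':'; · subst h3; decide
  by_cases h4 : c = '"'; · subst h4; decide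
  by_cases h5 : c = '/'; · subst h5; decide
  by_cases h6 : c = '\\'; · subst h6; decide
  by_cases h7 : c = '|'; · subst h7; decide
  by_cases h8 : c = '?'; · subst h8; decide
  by_cases h9 : c = '*'; · subst h9; decide
  have e1 : ('<' == c) = false := by rw [beq_eq_false_iff_ne]; exact fun h => h1 h.symm
  have e2 : ('>' == c) = false := by rw [beq_eq_false_iff_ne]; exact fun h => h2 h.symm
  have e3 : (':' == c) = false := by rw [beq_eq_false_iff_ne]; exact fun h => h3 h.symm
  have e4 : ('"' == c) = false := by rw [beq_eq_false_iff_ne]; exact fun h => h4 h.symm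
  have e5 : ('/' == c) = false := by rw [beq_eq_false_iff_ne]; exact fun h => h5 h.symm
  have e6 : ('\\' == c) = false := by rw [beq_eq_false_iff_ne]; exact fun h => h6 h.symm
  have e7 : ('|' == c) = false := by rw [beq_eq_false_iff_ne]; exact fun h => h7 h.symm
  have e8 : ('?' == c) = false := by rw [beq_eq_false_iff_ne]; exact fun h => h8 h.symm
  have e9 : ('*' == c) = false := by rw [beq_eq_false_iff_ne]; exact fun h => h9 h.symm
  have l1 : (c == '<') = false := by simp [h1]
  have l2 : (c == '>') = false := by simp [h2]
  have l3 : (c == ':') = false := by simp [h3]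
  have l4 : (c == '"') = false := by simp [h4]
  have l5 : (c == '/') = false := by simp [h5]
  have l6 : (c == '\\') = false := by simp [h6]
  have l7 : (c == '|') = false := by simp [h7]
  have l8 : (c == '?') = false := by simp [h8]
  have l9 : (c == '*') = false := by simp [h9]
  simp [pvTable, List.lookup, e1, e2, e3, e4, e5, e6, e7, e8, e9,
        l1, l2, l3, l4, l5, l6, l7, l8, l9]


-- the nine per-character maps fused into the single table-driven map, by induction
theorem map_chain : ∀ l : List Char,
    ((((((((((l.map (fun c => if ('<' == c) = true then '{' else c)).map
      (fun c => if ('>' == c) = true then '}' else c)).map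
      (fun c => if (':' == c) = true then ';' else c)).map
      (fun c => if ('"' == c) = true then '\'' else c)).map
      (fun c => if ('/' == c) = true then '_' else c)).map
      (fun c => if ('\\' == c) = true then '_' else c)).map
      (fun c => if ('|' == c) = true then '_' else c)).map
      (fun c => if ('?' == c) = true then '~' else c)).map
      (fun c => if ('*' == c) = true then '+' else c)))
      = l.map (fun c => (pvTable.lookup c).getD c)
  | [] => rfl
  | c :: t => by
      simp only [List.map_cons, map_chain t, point c]

-- ===== VERDICT (by name: the statement is the Claim_ definition above) =====
theorem escape_local_path_spec : Claim_equal_escape_local_path := by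
  intro path _
  unfold Spec_escape_local_path
  apply String.ext
  have hA : (escape_local_path path).toList =
      PySem.Chars.replace (PySem.Chars.replace (PySem.Chars.replace (PySem.Chars.replace
        (PySem.Chars.replace (PySem.Chars.replace (PySem.Chars.replace (PySem.Chars.replace
        (PySem.Chars.replace path.toList ['<'] ['{']) ['>'] ['}']) [':'] [';']) ['"'] ['\''])
        ['/'] ['_']) ['\\'] ['_']) ['|'] ['_']) ['?'] ['~']) ['*'] ['+'] := by
    simp [escape_local_path, PySem.Str.toList_replace]
  rw [hA]
  unfold escape_local_path_alt
  simp only [replace_single, String.toList_ofList]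
  exact map_chain path.toList
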